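-- pv_equiv track=rewrite | github.com/kidwhocodes/Efficient-RNN | scripts/correlate_pruning_metrics.py | _infer_metric_column
-- ===== SOURCE A (Python) =====
-- from typing import Dict, Iterable, List, Optional, Sequence, Tuple
--
-- def _infer_metric_column(header: Sequence[str]) -> Optional[str]:
--     preferred_suffix = (
--         "_mean",
--         "post_over_pre",
--         "delta_mle",
--         "post_mle",
--         "acc_drop",
--         "acc_ratio",
--         "rho_pres_mean",
--         "effective_connectivity",
--         "edge_density",
--         "mean_abs_weight_nz",
--         "giant_component_frac",
--     )
--     for col in header:
--         low = col.lower()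
--         if low in {"amount", "n", "strategy", "task"}:
--             continue
--         if any(low.endswith(s) or low == s for s in preferred_suffix):
--             return col
--     # fallback: first non-key numeric-looking column name
--     for col in header:
--         if col.lower() not in {"amount", "n", "strategy", "task"}:
--             return col
--     return None
-- ===== SOURCE B (Python) =====
-- def _infer_metric_column(header):
--     preferred_suffix = (
--         "_mean",
--         "post_over_pre",
--         "delta_mle",
--         "post_mle",
--         "acc_drop",
--         "acc_ratio",
--         "rho_pres_mean",
--         "effective_connectivity",
--         "edge_density",
--         "mean_abs_weight_nz",
--         "giant_component_frac",
--     )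
--     fallback = None
--     for col in header:
--         low = col.lower()
--         if low in {"amount", "n", "strategy", "task"}:
--             continue
--         if any(low.endswith(s) for s in preferred_suffix):
--             return col
--         if fallback is None:
--             fallback = col
--     return fallback
-- ===== Notes on version B (the rewrite author's own statement) =====
-- stated objective: simpler
-- what changed: Replaces A's two separate scans of the header with one pass that returns immediately on a preferred-suffix match and otherwise remembers the first non-key column as the fallback (the redundant 'or low == s' test is dropped since endswith already covers equality).
import Mathlib
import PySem

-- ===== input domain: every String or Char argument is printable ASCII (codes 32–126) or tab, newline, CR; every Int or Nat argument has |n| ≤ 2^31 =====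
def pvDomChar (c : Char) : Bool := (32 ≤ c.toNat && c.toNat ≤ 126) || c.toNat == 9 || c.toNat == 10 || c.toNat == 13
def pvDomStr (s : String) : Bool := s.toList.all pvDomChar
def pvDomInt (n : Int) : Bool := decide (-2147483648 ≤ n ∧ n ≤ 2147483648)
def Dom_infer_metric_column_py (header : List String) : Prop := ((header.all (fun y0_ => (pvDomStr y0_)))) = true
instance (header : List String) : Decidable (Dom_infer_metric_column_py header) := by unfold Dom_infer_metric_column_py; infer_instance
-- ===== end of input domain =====

-- ===== PORT A =====
-- B collapses A's two scans into one pass that keeps the first non-key column as a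
-- maintained fallback; objective: simpler (one traversal, no redundant equality test).
def pvKeys : List String := ["amount", "n", "strategy", "task"]
def pvPref : List String :=
  ["_mean", "post_over_pre", "delta_mle", "post_mle", "acc_drop", "acc_ratio",
   "rho_pres_mean", "effective_connectivity", "edge_density", "mean_abs_weight_nz",
   "giant_component_frac"]

-- first for-loop of A: first non-key column matching a preferred suffix
def pvALoop1 : List String → Option String
  | [] => none
  | col :: t =>
    let low := PySem.Str.lower col
    if pvKeys.contains low then pvALoop1 t
    else if pvPref.any (fun s => PySem.Str.endswith low s || low == s) then some col
    else pvALoop1 t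

-- second for-loop of A: first non-key column
def pvALoop2 : List String → Option String
  | [] => none
  | col :: t =>
    if pvKeys.contains (PySem.Str.lower col) then pvALoop2 t else some col

def infer_metric_column_py (header : List String) : Option String :=
  match pvALoop1 header with
  | some c => some c
  | none => pvALoop2 header

-- ===== PORT B =====
-- B's single pass: `fb` holds the first non-key column seen so far
def pvBLoop : List String → Option String → Option String
  | [], fb => fb
  | col :: t, fb =>
    let low := PySem.Str.lower col
    if pvKeys.contains low then pvBLoop t fb
    else if pvPref.any (fun s => PySem.Str.endswith low s) then some col
    else pvBLoop t (if fb.isNone then some col else fb)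

def infer_metric_column_py_alt (header : List String) : Option String :=
  pvBLoop header none

-- ===== PRECONDITION & SPEC =====
def Spec_infer_metric_column_py (header : List String) (out : Option String) : Prop := out = infer_metric_column_py_alt header
instance (header : List String) (out : Option String) : Decidable (Spec_infer_metric_column_py header out) := by unfold Spec_infer_metric_column_py; infer_instance

-- ===== CLAIM (what is proved, stated in full; the proofs are below) =====
def Claim_equal_infer_metric_column_py : Prop := ∀ (header : List String), Dom_infer_metric_column_py header → Spec_infer_metric_column_py header (infer_metric_column_py header)

-- ===== LEMMAS AND PROOFS =====
theorem pv_endswith_self (l : List Char) : PySem.Chars.endswith l l = true :=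
  (PySem.Chars.endswith_iff _ _).mpr (List.suffix_refl _)

theorem pv_cond_eq (low s : String) :
    (PySem.Str.endswith low s || low == s) = PySem.Str.endswith low s := by
  cases h : low == s
  · simp
  · have : low = s := eq_of_beq h
    subst this
    simp [pv_endswith_self]

theorem pv_pref_eq (low : String) :
    pvPref.any (fun s => PySem.Str.endswith low s || low == s)
      = pvPref.any (fun s => PySem.Str.endswith low s) := by
  have : (fun s => PySem.Str.endswith low s || low == s)
      = (fun s => PySem.Str.endswith low s) := funext fun s => pv_cond_eq low s
  rw [this]

theorem pvBLoop_eq (t : List String) :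
    ∀ fb, pvBLoop t fb
      = ((pvALoop1 t).orElse fun _ => fb.orElse fun _ => pvALoop2 t) := by
  induction t with
  | nil => intro fb; cases fb <;> simp [pvBLoop, pvALoop1, pvALoop2]
  | cons col t ih =>
    intro fb
    by_cases hk : pvKeys.contains (PySem.Str.lower col) = true
    · simp only [pvBLoop, pvALoop1, pvALoop2, hk, if_true]
      exact ih fb
    · by_cases hp : (pvPref.any fun s => PySem.Str.endswith (PySem.Str.lower col) s) = true
      · simp only [pvBLoop, pvALoop1, pv_pref_eq]
        rw [if_neg hk, if_neg hk, if_pos hp, if_pos hp]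
        simp
      · simp only [pvBLoop, pvALoop1, pvALoop2, pv_pref_eq, hk, hp, if_false,
          Bool.false_eq_true]
        cases fb with
        | none => simpa using ih (some col)
        | some f =>
          rw [show (if (some f).isNone then some col else some f) = some f from rfl, ih]
          cases pvALoop1 t <;> simp

theorem infer_metric_column_py_spec : Claim_equal_infer_metric_column_py := by
  intro header _
  show infer_metric_column_py header = infer_metric_column_py_alt header
  rw [infer_metric_column_py_alt, pvBLoop_eq]
  unfold infer_metric_column_py
  cases h : pvALoop1 header <;> simp
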